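-- pv_equiv track=rewrite | github.com/Popygai4ik/files | УРОКИ/23/Itogovoe dz/1.py | to23
-- ===== SOURCE A (Python) =====
-- def to23(start, stop):
--     if start == 20:
--         return 0
--     if start>stop:
--         return 0
--     if start == stop:
--         return 1
--     if start< stop:
--         return to23(start +2, stop)+to23(start * 3, stop)
-- ===== SOURCE B (Python) =====
-- def to23(start, stop):
--     # Bottom-up DP over values from stop down to start (O(stop-start) instead of exponential recursion).
--     if start == 20 or start > stop:
--         return 0
--     if start == stop:
--         return 1
--     dp = {stop: 0 if stop == 20 else 1}
--     for v in range(stop - 1, start - 1, -1):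
--         dp[v] = 0 if v == 20 else dp.get(v + 2, 0) + dp.get(v * 3, 0)
--     return dp[start]
-- ===== Notes on version B (the rewrite author's own statement) =====
-- stated objective: faster
-- what changed: Replaced A's exponential branching recursion with a bottom-up dynamic-programming table filled from stop down to start, so each value is computed once.
import Mathlib
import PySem

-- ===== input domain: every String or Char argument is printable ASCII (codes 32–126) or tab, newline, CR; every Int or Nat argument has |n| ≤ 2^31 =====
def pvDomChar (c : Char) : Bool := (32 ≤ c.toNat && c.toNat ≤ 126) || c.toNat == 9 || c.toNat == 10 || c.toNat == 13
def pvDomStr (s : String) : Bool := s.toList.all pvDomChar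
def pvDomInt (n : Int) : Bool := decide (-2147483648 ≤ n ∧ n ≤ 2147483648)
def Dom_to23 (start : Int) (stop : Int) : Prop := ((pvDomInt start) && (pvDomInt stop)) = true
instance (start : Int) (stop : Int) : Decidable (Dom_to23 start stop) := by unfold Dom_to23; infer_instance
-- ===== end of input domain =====

-- B replaces A's exponential branching recursion by a bottom-up DP table over the values stop..start (objective: faster).

-- ===== PORT A =====
-- literal transliteration of A's recursion; the Nat fuel only makes the recursion structurally
-- total (Pre_ guarantees the initial fuel (stop-start).toNat+1 is never exhausted)
def to23Go (fuel : Nat) (start : Int) (stop : Int) : Int :=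
  match fuel with
  | 0 => 0
  | fuel + 1 =>
    if start = 20 then 0
    else if start > stop then 0
    else if start = stop then 1
    else to23Go fuel (start + 2) stop + to23Go fuel (start * 3) stop

def to23 (start : Int) (stop : Int) : Int :=
  to23Go ((stop - start).toNat + 1) start stop

-- ===== PORT B =====
def to23_alt (start : Int) (stop : Int) : Int :=
  if start = 20 ∨ start > stop then 0
  else if start = stop then 1
  else
    let dp0 : PySem.Dict Int Int := PySem.Dict.insert PySem.Dict.empty stop (if stop = 20 then 0 else 1)
    let dp := (PySem.List.pyRange (stop - 1) (start - 1) (-1)).foldl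
      (fun d v => d.insert v (if v = 20 then 0 else d.getD (v + 2) 0 + d.getD (v * 3) 0)) dp0
    dp.getD start 0   -- dp[start]; the key was inserted by the loop, so no KeyError

-- ===== PRECONDITION & SPEC =====
-- Pre_ excludes exactly the inputs where A never returns: for start ≤ 0 with start < stop and
-- start ≠ 20 the ×3 branch recurses forever (Python dies with RecursionError).
def Pre_to23 (start : Int) (stop : Int) : Prop := 1 ≤ start ∨ stop ≤ start ∨ start = 20
instance (start : Int) (stop : Int) : Decidable (Pre_to23 start stop) := by unfold Pre_to23; infer_instance
def pvWitness_to23 : Int × Int := (1, 9)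
def Spec_to23 (start : Int) (stop : Int) (out : Int) : Prop := out = to23_alt start stop
instance (start : Int) (stop : Int) (out : Int) : Decidable (Spec_to23 start stop out) := by unfold Spec_to23; infer_instance

-- ===== CLAIM (what is proved, stated in full; the proofs are below) =====
def Claim_equal_to23 : Prop := ∀ (start : Int) (stop : Int), Dom_to23 start stop → Pre_to23 start stop → Spec_to23 start stop (to23 start stop)

-- ===== LEMMAS AND PROOFS =====

-- A's recursion depth is bounded by stop - start when 1 ≤ start: the fuel is irrelevant once large enough.
theorem to23Go_stable (stop : Int) : ∀ (n m : Nat) (s : Int), 1 ≤ s →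
    (stop - s).toNat < n → (stop - s).toNat < m → to23Go n s stop = to23Go m s stop := by
  intro n
  induction n with
  | zero => intro m s _ hn; omega
  | succ n ih =>
    intro m s hs hn hm
    cases m with
    | zero => omega
    | succ m =>
      simp only [to23Go]
      split_ifs with h20 hgt heq
      · rfl
      · rfl
      · rfl
      · have h2 : to23Go n (s + 2) stop = to23Go m (s + 2) stop := ih m (s + 2) (by omega) (by omega) (by omega)
        have h3 : to23Go n (s * 3) stop = to23Go m (s * 3) stop := ih m (s * 3) (by omega) (by omega) (by omega)
        rw [h2, h3]

theorem to23_gt (s stop : Int) (h : stop < s) : to23 s stop = 0 := by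
  have h0 : (stop - s).toNat = 0 := by omega
  simp only [to23, h0, to23Go]
  split_ifs <;> first | rfl | omega

theorem to23_stop (s stop : Int) (h : s = stop) : to23 s stop = if s = 20 then 0 else 1 := by
  subst h
  simp only [to23, to23Go]
  split_ifs <;> simp_all

theorem to23_unfold (s stop : Int) (h1 : 1 ≤ s) (h2 : s < stop) (h20 : s ≠ 20) :
    to23 s stop = to23 (s + 2) stop + to23 (s * 3) stop := by
  conv_lhs => rw [to23]
  simp only [to23Go]
  split_ifs with a b c
  · exact absurd a h20
  · omega
  · omega
  · rw [to23Go_stable stop ((stop - s).toNat) ((stop - (s + 2)).toNat + 1) (s + 2) (by omega) (by omega) (by omega),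
        to23Go_stable stop ((stop - s).toNat) ((stop - s * 3).toNat + 1) (s * 3) (by omega) (by omega) (by omega)]
    rfl

-- invariant of B's descending DP loop: the dict agrees with A's recursion above the cursor
theorem fold_inv (stop lo : Int) (hlo : 0 ≤ lo) :
    ∀ (n : Nat) (a : Int) (d : PySem.Dict Int Int), a = lo + n → a < stop →
    (∀ u, a < u → d.getD u 0 = to23 u stop) →
    ∀ u, lo < u →
      ((PySem.List.pyRange a lo (-1)).foldl
        (fun d v => d.insert v (if v = 20 then 0 else d.getD (v + 2) 0 + d.getD (v * 3) 0)) d).getD u 0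
      = to23 u stop := by
  intro n
  induction n with
  | zero =>
    intro a d ha _ hd u hu
    rw [PySem.List.pyRange_neg_one_eq_nil (by omega)]
    exact hd u (by omega)
  | succ n ih =>
    intro a d ha hstop hd u hu
    rw [PySem.List.pyRange_neg_one_cons (by omega : lo < a)]
    simp only [List.foldl_cons]
    apply ih (a - 1) _ (by omega) (by omega) _ u hu
    intro w hw
    rw [PySem.Dict.getD_insert]
    by_cases hwa : w = a
    · subst hwa
      have hv : (if w = 20 then (0:Int) else d.getD (w + 2) 0 + d.getD (w * 3) 0) = to23 w stop := by
        by_cases h20 : w = 20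
        · subst h20; simp [to23, to23Go]
        · rw [if_neg h20, hd (w + 2) (by omega), hd (w * 3) (by omega),
              to23_unfold w stop (by omega) hstop h20]
      simpa using hv
    · rw [if_neg hwa]
      exact hd w (by omega)

-- ===== VERDICT (by name: the statement is the Claim_ definition above) =====
theorem to23_spec : Claim_equal_to23 := by
  intro start stop _ hpre
  unfold Spec_to23 to23_alt
  by_cases h1 : start = 20 ∨ start > stop
  · rw [if_pos h1]
    rcases h1 with h20 | hgt
    · subst h20
      simp [to23, to23Go]
    · exact to23_gt start stop hgt
  · rw [if_neg h1]
    simp only [not_or, not_lt] at h1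
    obtain ⟨h20, hle⟩ := h1
    by_cases h2 : start = stop
    · rw [if_pos h2, to23_stop start stop h2, if_neg h20]
    · rw [if_neg h2]
      have hlt : start < stop := by omega
      have hs1 : 1 ≤ start := by
        rcases hpre with h | h | h
        · exact h
        · omega
        · exact absurd h h20
      symm
      show (List.foldl (fun d v => d.insert v (if v = 20 then 0 else d.getD (v + 2) 0 + d.getD (v * 3) 0))
              (PySem.Dict.empty.insert stop (if stop = 20 then 0 else 1))
              (PySem.List.pyRange (stop - 1) (start - 1) (-1))).getD start 0 = to23 start stop
      apply fold_inv stop (start - 1) (by omega) ((stop - 1 - (start - 1)).toNat) (stop - 1) _ (by omega) (by omega)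
        _ start (by omega)
      intro u hu
      rw [PySem.Dict.getD_insert]
      by_cases hus : u = stop
      · subst hus
        rw [if_pos rfl, to23_stop u u rfl]
      · rw [if_neg hus]
        simp only [PySem.Dict.getD_empty]
        exact (to23_gt u stop (by omega)).symm
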